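-- pv_equiv track=rewrite | github.com/h-sane/testing | src/harness/verification.py | _compare_text_maps
-- ===== SOURCE A (Python) =====
-- from typing import Dict, Any, Tuple, List, Optional
--
-- def _compare_text_maps(pre: Dict, post: Dict) -> bool:
--     for fp, text in pre.items():
--         if fp in post and post[fp] != text:
--             return True
--     # Also check if new fingerprints appeared with text
--     for fp in post:
--         if fp not in pre:
--             return True
--     return False
-- ===== SOURCE B (Python) =====
-- def _compare_text_maps(pre, post) -> bool:
--     # Single pass over post: a changed shared fingerprint or a brand-new one
--     # is always visible from post's side; removed fingerprints are ignored.
--     for fp, text in post.items():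
--         if fp not in pre or pre[fp] != text:
--             return True
--     return False
-- ===== Notes on version B (the rewrite author's own statement) =====
-- stated objective: simpler
-- what changed: Collapses A's two sequential loops (scan pre for changed shared keys, then scan post for new keys) into one pass over post that flags a fingerprint absent from pre or mapping to a different text, since every changed or new fingerprint is a key of post.
import Mathlib
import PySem

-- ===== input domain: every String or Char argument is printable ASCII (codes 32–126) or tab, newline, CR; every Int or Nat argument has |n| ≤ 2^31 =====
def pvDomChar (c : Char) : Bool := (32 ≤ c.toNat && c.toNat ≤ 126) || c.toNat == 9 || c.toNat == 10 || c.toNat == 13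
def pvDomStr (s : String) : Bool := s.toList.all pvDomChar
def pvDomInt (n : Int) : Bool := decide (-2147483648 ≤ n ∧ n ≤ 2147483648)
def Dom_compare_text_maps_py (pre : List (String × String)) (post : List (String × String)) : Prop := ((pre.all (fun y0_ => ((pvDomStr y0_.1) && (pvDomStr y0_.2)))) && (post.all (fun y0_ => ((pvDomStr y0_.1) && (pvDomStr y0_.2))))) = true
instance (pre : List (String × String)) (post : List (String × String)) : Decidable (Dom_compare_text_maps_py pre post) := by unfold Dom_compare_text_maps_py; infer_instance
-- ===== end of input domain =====

-- B replaces A's two sequential scans (pre for changed shared keys, post for new keys)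
-- with a single pass over post; objective: simpler.

-- ===== PORT A =====
-- first loop of A: for fp, text in pre.items(): if fp in post and post[fp] != text: return True
def aChangedLoop (post : PySem.Dict String String) : List (String × String) → Bool
  | [] => false
  | (fp, text) :: rest =>
      match post.get? fp with            -- 'fp in post and post[fp] != text'
      | some v => if v ≠ text then true else aChangedLoop post rest
      | none => aChangedLoop post rest

-- second loop of A: for fp in post: if fp not in pre: return True
def aNewLoop (pre : PySem.Dict String String) : List (String × String) → Bool
  | [] => false
  | (fp, _) :: rest => if pre.contains fp then aNewLoop pre rest else true

def compare_text_maps_py (pre : List (String × String)) (post : List (String × String)) : Bool :=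
  if aChangedLoop (PySem.Dict.mk post) pre then true
  else aNewLoop (PySem.Dict.mk pre) post

-- ===== PORT B =====
-- single loop of B: for fp, text in post.items(): if fp not in pre or pre[fp] != text: return True
def bLoop (pre : PySem.Dict String String) : List (String × String) → Bool
  | [] => false
  | (fp, text) :: rest =>
      match pre.get? fp with             -- 'fp not in pre or pre[fp] != text'
      | none => true
      | some v => if v ≠ text then true else bLoop pre rest

def compare_text_maps_py_alt (pre : List (String × String)) (post : List (String × String)) : Bool :=
  bLoop (PySem.Dict.mk pre) post

-- ===== PRECONDITION & SPEC =====
-- Python's arguments are dicts, whose keys are unique; Pre_ restricts the association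
-- lists to those actually representing a dict (no duplicate keys). It excludes no input
-- the Python A accepts.
def Pre_compare_text_maps_py (pre : List (String × String)) (post : List (String × String)) : Prop :=
  (pre.map Prod.fst).Nodup ∧ (post.map Prod.fst).Nodup
instance (pre : List (String × String)) (post : List (String × String)) : Decidable (Pre_compare_text_maps_py pre post) := by unfold Pre_compare_text_maps_py; infer_instance

def pvWitness_compare_text_maps_py : (List (String × String)) × (List (String × String)) :=
  ([("a", "x"), ("b", "y")], [("a", "z"), ("c", "y")])

def Spec_compare_text_maps_py (pre : List (String × String)) (post : List (String × String)) (out : Bool) : Prop := out = compare_text_maps_py_alt pre post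
instance (pre : List (String × String)) (post : List (String × String)) (out : Bool) : Decidable (Spec_compare_text_maps_py pre post out) := by unfold Spec_compare_text_maps_py; infer_instance

-- ===== CLAIM (what is proved, stated in full; the proofs are below) =====
def Claim_equal_compare_text_maps_py : Prop := ∀ (pre : List (String × String)) (post : List (String × String)), Dom_compare_text_maps_py pre post → Pre_compare_text_maps_py pre post → Spec_compare_text_maps_py pre post (compare_text_maps_py pre post)

-- ===== LEMMAS AND PROOFS =====

theorem get?_mk_eq_some_mem {l : List (String × String)} {k : String} {v : String}
    (h : (PySem.Dict.mk l).get? k = some v) : (k, v) ∈ l := by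
  induction l with
  | nil => simp [PySem.Dict.get?] at h
  | cons p rest ih =>
      obtain ⟨a, b⟩ := p
      rw [PySem.Dict.get?_mk_cons] at h
      by_cases hk : a = k
      · subst hk
        simp at h
        simp [h]
      · simp [hk] at h
        exact List.mem_cons_of_mem _ (ih h)

theorem get?_mk_eq_some_of_mem {l : List (String × String)} {k : String} {v : String}
    (hn : (l.map Prod.fst).Nodup) (h : (k, v) ∈ l) : (PySem.Dict.mk l).get? k = some v := by
  induction l with
  | nil => simp at h
  | cons p rest ih =>
      obtain ⟨a, b⟩ := p
      simp only [List.map_cons, List.nodup_cons] at hn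
      rw [PySem.Dict.get?_mk_cons]
      rcases List.mem_cons.mp h with h1 | h2
      · obtain ⟨rfl, rfl⟩ := Prod.mk.injEq .. ▸ h1
        simp
      · by_cases hk : a = k
        · subst hk
          exact absurd (List.mem_map.mpr ⟨(a, v), h2, rfl⟩) hn.1
        · simp [hk]
          exact ih hn.2 h2

theorem contains_eq_isSome (d : PySem.Dict String String) (k : String) :
    d.contains k = (d.get? k).isSome := by
  obtain ⟨l⟩ := d
  induction l with
  | nil => rfl
  | cons p rest ih =>
      obtain ⟨a, b⟩ := p
      rw [PySem.Dict.get?_mk_cons]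
      by_cases hk : a = k
      · subst hk; simp [PySem.Dict.contains]
      · have hb : (a == k) = false := beq_eq_false_iff_ne.mpr hk
        simpa [PySem.Dict.contains, hb] using ih

theorem aChangedLoop_eq_true_iff (d : PySem.Dict String String) (l : List (String × String)) :
    aChangedLoop d l = true ↔ ∃ p ∈ l, ∃ v, d.get? p.1 = some v ∧ v ≠ p.2 := by
  induction l with
  | nil => simp [aChangedLoop]
  | cons p rest ih =>
      obtain ⟨fp, text⟩ := p
      rcases hg : d.get? fp with _ | v
      · simp [aChangedLoop, hg, ih]
      · by_cases hv : v = text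
        · subst hv
          simp only [aChangedLoop, hg]
          rw [if_neg (show ¬(v ≠ v) from fun h => h rfl), ih]
          constructor
          · exact fun ⟨p, hp, hv⟩ => ⟨p, List.mem_cons_of_mem _ hp, hv⟩
          · rintro ⟨p, hp, w, hw, hne⟩
            rcases List.mem_cons.mp hp with rfl | hp'
            · rw [hg] at hw; cases hw; exact absurd rfl hne
            · exact ⟨p, hp', w, hw, hne⟩
        · constructor
          · intro _; exact ⟨(fp, text), List.mem_cons_self .., v, hg, hv⟩
          · intro _; simp [aChangedLoop, hg, hv]

theorem aNewLoop_eq_true_iff (d : PySem.Dict String String) (l : List (String × String)) :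
    aNewLoop d l = true ↔ ∃ p ∈ l, d.get? p.1 = none := by
  induction l with
  | nil => simp [aNewLoop]
  | cons p rest ih =>
      obtain ⟨fp, text⟩ := p
      by_cases hc : d.contains fp
      · have hs : (d.get? fp).isSome := by rw [← contains_eq_isSome]; exact hc
        simp only [aNewLoop, if_pos hc]
        rw [ih]
        constructor
        · exact fun ⟨p, hp, hn⟩ => ⟨p, List.mem_cons_of_mem _ hp, hn⟩
        · rintro ⟨p, hp, hn⟩
          rcases List.mem_cons.mp hp with rfl | hp'
          · rw [hn] at hs; simp at hs
          · exact ⟨p, hp', hn⟩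
      · have hn : d.get? fp = none := by
          have h := contains_eq_isSome d fp
          rw [Bool.eq_false_iff.mpr hc] at h
          exact Option.not_isSome_iff_eq_none.mp (by simp [← h])
        simp only [aNewLoop, if_neg hc]
        constructor
        · intro _; exact ⟨(fp, text), List.mem_cons_self .., hn⟩
        · intro _; trivial

theorem bLoop_eq_true_iff (d : PySem.Dict String String) (l : List (String × String)) :
    bLoop d l = true ↔ ∃ p ∈ l, d.get? p.1 ≠ some p.2 := by
  induction l with
  | nil => simp [bLoop]
  | cons p rest ih =>
      obtain ⟨fp, text⟩ := p
      rcases hg : d.get? fp with _ | v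
      · constructor
        · intro _; exact ⟨(fp, text), List.mem_cons_self .., by simp [hg]⟩
        · intro _; simp [bLoop, hg]
      · by_cases hv : v = text
        · subst hv
          simp only [bLoop, hg]
          rw [if_neg (show ¬(v ≠ v) from fun h => h rfl), ih]
          constructor
          · exact fun ⟨p, hp, hne⟩ => ⟨p, List.mem_cons_of_mem _ hp, hne⟩
          · rintro ⟨p, hp, hne⟩
            rcases List.mem_cons.mp hp with rfl | hp'
            · exact absurd hg hne
            · exact ⟨p, hp', hne⟩
        · constructor
          · intro _; exact ⟨(fp, text), List.mem_cons_self .., by simp [hg, hv]⟩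
          · intro _; simp [bLoop, hg, hv]

-- ===== VERDICT (by name: the statement is the Claim_ definition above) =====
theorem compare_text_maps_py_spec : Claim_equal_compare_text_maps_py := by
  intro pre post _hdom hpre
  obtain ⟨hnpre, hnpost⟩ := hpre
  unfold Spec_compare_text_maps_py compare_text_maps_py compare_text_maps_py_alt
  rw [Bool.eq_iff_iff]
  constructor
  · intro h
    split_ifs at h with h1
    · -- the changed-loop of A fired
      rw [aChangedLoop_eq_true_iff] at h1
      obtain ⟨⟨fp, text⟩, hmem, v, hget, hne⟩ := h1
      rw [bLoop_eq_true_iff]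
      refine ⟨(fp, v), get?_mk_eq_some_mem hget, ?_⟩
      have : (PySem.Dict.mk pre).get? fp = some text := get?_mk_eq_some_of_mem hnpre hmem
      simp [this]
      exact fun hh => hne hh.symm
    · -- the new-key loop of A fired
      rw [aNewLoop_eq_true_iff] at h
      obtain ⟨⟨fp, text⟩, hmem, hnone⟩ := h
      rw [bLoop_eq_true_iff]
      exact ⟨(fp, text), hmem, by simp [hnone]⟩
  · intro h
    rw [bLoop_eq_true_iff] at h
    obtain ⟨⟨fp, text⟩, hmem, hne⟩ := h
    rcases hg : (PySem.Dict.mk pre).get? fp with _ | w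
    · -- fp is not in pre: A's second loop fires (or first already did)
      split_ifs with h1
      · rfl
      rw [aNewLoop_eq_true_iff]
      exact ⟨(fp, text), hmem, hg⟩
    · -- fp is in pre with a different text: A's first loop fires
      have hw : w ≠ text := by
        intro hEq; subst hEq; exact hne (by simp [hg])
      have hpost : (PySem.Dict.mk post).get? fp = some text :=
        get?_mk_eq_some_of_mem hnpost hmem
      have hApre : (fp, w) ∈ pre := get?_mk_eq_some_mem hg
      have : aChangedLoop (PySem.Dict.mk post) pre = true := by
        rw [aChangedLoop_eq_true_iff]
        exact ⟨(fp, w), hApre, text, hpost, fun hh => hw hh.symm⟩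
      simp [this]
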